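-- pv_equiv track=rewrite | github.com/offbynull/offbynull.github.io | docs/data/learn/Bioinformatics/output/ch6_code/src/Stepik.6.13.2BreakOnChromosomePermutations.py | black_edges
-- ===== SOURCE A (Python) =====
-- from typing import List, Tuple
--
-- def chromosome_to_cycle(p: List[int]) -> List[int]:
--     ret = []
--     for chromosome in p:
--         i = abs(chromosome)
--         if chromosome > 0:
--             ret.append(2*i - 1)
--             ret.append(2*i)
--         else:
--             ret.append(2*i)
--             ret.append(2*i - 1)
--     return ret
--
-- def black_edges(p_list: List[List[int]]) -> List[Tuple[int, int, str]]:
--     edges = []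
--     offset = 0
--     for p in p_list:
--         nodes = chromosome_to_cycle(p)
--         nodes = [n + offset for n in nodes]  # add offset to chromosome's node ids
--         offset += len(nodes)        # update offset used to shift next chromosome's node ids
--         for x1, x2 in zip(nodes[0::2], nodes[1::2]):
--             edges.append((x1, x2, 'BLACK'))
--     return edges
-- ===== SOURCE B (Python) =====
-- from typing import List, Tuple
--
-- def black_edges(p_list: List[List[int]]) -> List[Tuple[int, int, str]]:
--     edges = []
--     offset = 0
--     for p in p_list:
--         for v in p:
--             i = abs(v)
--             if v > 0:
--                 edges.append((2*i - 1 + offset, 2*i + offset, 'BLACK'))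
--             else:
--                 edges.append((2*i + offset, 2*i - 1 + offset, 'BLACK'))
--         offset += 2 * len(p)
--     return edges
-- ===== Notes on version B (the rewrite author's own statement) =====
-- stated objective: simpler
-- what changed: Eliminates the chromosome_to_cycle intermediate node list, the offset-shifting map pass and the stride-2 zip re-pairing: one direct pass emits each black edge per gene from a running offset, updated by 2*len(p) per chromosome.
import Mathlib
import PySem

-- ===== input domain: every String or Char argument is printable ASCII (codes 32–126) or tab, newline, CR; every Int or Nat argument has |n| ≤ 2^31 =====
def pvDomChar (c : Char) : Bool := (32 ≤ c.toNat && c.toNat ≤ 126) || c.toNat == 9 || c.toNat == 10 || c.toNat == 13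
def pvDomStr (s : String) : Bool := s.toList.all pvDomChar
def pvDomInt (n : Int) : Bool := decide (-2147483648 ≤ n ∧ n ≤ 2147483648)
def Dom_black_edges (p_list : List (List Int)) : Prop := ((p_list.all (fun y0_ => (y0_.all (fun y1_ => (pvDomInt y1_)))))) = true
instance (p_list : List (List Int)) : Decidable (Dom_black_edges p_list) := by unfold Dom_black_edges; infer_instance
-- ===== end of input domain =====

-- B fuses A's build-cycle / shift-by-offset / stride-2-zip passes into one direct per-gene pass (simpler; same value).

-- ===== PORT A =====
def chromosome_to_cycle (p : List Int) : List Int :=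
  p.foldl (fun ret c =>
    let i := |c|
    if c > 0 then (ret ++ [2*i - 1]) ++ [2*i]
    else (ret ++ [2*i]) ++ [2*i - 1]) []

def black_edges (p_list : List (List Int)) : List (Int × Int × String) :=
  (p_list.foldl (fun (acc : List (Int × Int × String) × Int) p =>
    let nodes := chromosome_to_cycle p
    let nodes := nodes.map (fun n => n + acc.2)
    let offset := acc.2 + (nodes.length : Int)
    -- zip(nodes[0::2], nodes[1::2]); stride slices via PySem.List.slice? (never none for step 2)
    let pairs := ((PySem.List.slice? nodes (some 0) none 2).getD []).zip
                 ((PySem.List.slice? nodes (some 1) none 2).getD [])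
    (pairs.foldl (fun e xy => e ++ [(xy.1, xy.2, "BLACK")]) acc.1, offset)) ([], 0)).1

-- ===== PORT B =====
def black_edges_alt (p_list : List (List Int)) : List (Int × Int × String) :=
  (p_list.foldl (fun (acc : List (Int × Int × String) × Int) p =>
    (p.foldl (fun e v =>
        let i := |v|
        if v > 0 then e ++ [(2*i - 1 + acc.2, 2*i + acc.2, "BLACK")]
        else e ++ [(2*i + acc.2, 2*i - 1 + acc.2, "BLACK")]) acc.1,
     acc.2 + 2 * (p.length : Int))) ([], 0)).1

-- ===== PRECONDITION & SPEC =====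
def Spec_black_edges (p_list : List (List Int)) (out : List (Int × Int × String)) : Prop := out = black_edges_alt p_list
instance (p_list : List (List Int)) (out : List (Int × Int × String)) : Decidable (Spec_black_edges p_list out) := by unfold Spec_black_edges; infer_instance

-- ===== CLAIM (what is proved, stated in full; the proofs are below) =====
def Claim_equal_black_edges : Prop := ∀ (p_list : List (List Int)), Dom_black_edges p_list → Spec_black_edges p_list (black_edges p_list)

-- ===== LEMMAS AND PROOFS =====

-- the two-element block a gene contributes to the cycle
def pvGene (c : Int) : List Int := if c > 0 then [2*|c| - 1, 2*|c|] else [2*|c|, 2*|c| - 1]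

def pvEvens {α : Type} : List α → List α
  | a :: _ :: t => a :: pvEvens t
  | [a] => [a]
  | [] => []

def pvOdds {α : Type} : List α → List α
  | _ :: b :: t => b :: pvOdds t
  | _ => []

lemma cycle_aux (p : List Int) (init : List Int) :
    p.foldl (fun ret c =>
      let i := |c|
      if c > 0 then (ret ++ [2*i - 1]) ++ [2*i]
      else (ret ++ [2*i]) ++ [2*i - 1]) init = init ++ p.flatMap pvGene := by
  induction p generalizing init with
  | nil => simp
  | cons c p ih =>
    simp only [List.foldl_cons, List.flatMap_cons, ih]
    unfold pvGene
    split <;> simp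

lemma cycle_eq (p : List Int) : chromosome_to_cycle p = p.flatMap pvGene := by
  unfold chromosome_to_cycle
  rw [cycle_aux p []]
  simp

lemma fm_even {α : Type} (xs : List α) :
    List.filterMap (fun k : Nat => xs[(0 + 2 * (k : Int)).toNat]?) (List.range ((((xs.length : Int)) - 0 + 2 - 1) / 2).toNat)
      = pvEvens xs := by
  induction xs using pvEvens.induct with
  | case3 => simp [pvEvens]
  | case2 a =>
    have : (((([a] : List α).length : Int)) - 0 + 2 - 1) / 2 = 1 := by norm_num
    rw [this]
    simp [pvEvens]
  | case1 a b t ih =>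
    have hcount : ((((a :: b :: t).length : Int)) - 0 + 2 - 1) / 2
        = ((((t.length : Int)) - 0 + 2 - 1) / 2) + 1 := by
      simp only [List.length_cons]
      push_cast
      omega
    have hc0 : (0 ≤ (((t.length : Int)) - 0 + 2 - 1) / 2) :=
      Int.ediv_nonneg (by omega) (by norm_num)
    rw [hcount, Int.toNat_add hc0 (by norm_num), Int.toNat_one, List.range_succ_eq_map]
    simp only [List.filterMap_cons, List.filterMap_map]
    have h0 : (0 + 2 * ((0 : Nat) : Int)).toNat = 0 := by norm_num
    rw [h0]
    simp only [List.getElem?_cons_zero, Function.comp]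
    have harg : ∀ k : Nat, (a :: b :: t)[(0 + 2 * ((k + 1 : Nat) : Int)).toNat]?
        = t[(0 + 2 * (k : Int)).toNat]? := by
      intro k
      rw [show (0 + 2 * ((k + 1 : Nat) : Int)).toNat = ((0 + 2 * (k : Int)).toNat + 1) + 1 from by
        push_cast; omega]
      rw [List.getElem?_cons_succ, List.getElem?_cons_succ]
    simp only [harg]
    rw [ih]
    simp [pvEvens]

lemma fm_odd {α : Type} (xs : List α) :
    List.filterMap (fun k : Nat => xs[(min 1 (xs.length : Int) + 2 * (k : Int)).toNat]?)
      (List.range ((((xs.length : Int)) - min 1 (xs.length : Int) + 2 - 1) / 2).toNat)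
      = pvOdds xs := by
  induction xs using pvOdds.induct with
  | case2 xs h =>
    rcases xs with _ | ⟨a, _ | ⟨b, t⟩⟩
    · simp [pvOdds]
    · have : (((([a] : List α).length : Int)) - min 1 (([a] : List α).length : Int) + 2 - 1) / 2 = 0 := by
        norm_num
      rw [this]
      simp [pvOdds]
    · exact absurd rfl (h a b t)
  | case1 a b t ih =>
    have hmin : min 1 (((a :: b :: t).length : Int)) = 1 :=
      min_eq_left (by simp only [List.length_cons]; push_cast; omega)
    have hcount : ((((a :: b :: t).length : Int)) - 1 + 2 - 1) / 2
        = ((((t.length : Int)) - min 1 (t.length : Int) + 2 - 1) / 2) + 1 := by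
      rcases t with _ | ⟨x, t'⟩
      · norm_num
      · have hm : min 1 (((x :: t').length : Int)) = 1 :=
          min_eq_left (by simp only [List.length_cons]; push_cast; omega)
        rw [hm]
        simp only [List.length_cons]
        push_cast
        omega
    have hc0 : 0 ≤ (((t.length : Int)) - min 1 (t.length : Int) + 2 - 1) / 2 := by
      apply Int.ediv_nonneg _ (by norm_num)
      have h1 : min 1 ((t.length : Int)) ≤ 1 := min_le_left _ _
      have h2 : (0 : Int) ≤ (t.length : Int) := by positivity
      omega
    rw [hmin, hcount, Int.toNat_add hc0 (by norm_num), Int.toNat_one, List.range_succ_eq_map]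
    simp only [List.filterMap_cons, List.filterMap_map]
    have h0 : ((1 : Int) + 2 * ((0 : Nat) : Int)).toNat = 1 := by norm_num
    rw [h0]
    simp only [Function.comp, List.getElem?_cons_succ, List.getElem?_cons_zero]
    have harg : ∀ k : Nat, (a :: b :: t)[((1 : Int) + 2 * ((k + 1 : Nat) : Int)).toNat]?
        = t[(min 1 (t.length : Int) + 2 * (k : Int)).toNat]? := by
      intro k
      rcases t with _ | ⟨x, t'⟩
      · rw [show ((1 : Int) + 2 * ((k + 1 : Nat) : Int)).toNat = k * 2 + 3 from by push_cast; omega]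
        simp
      · have hm : min 1 (((x :: t').length : Int)) = 1 :=
          min_eq_left (by simp only [List.length_cons]; push_cast; omega)
        rw [hm]
        rw [show ((1 : Int) + 2 * ((k + 1 : Nat) : Int)).toNat = (((1 : Int) + 2 * (k : Int)).toNat + 1) + 1 from by
          push_cast; omega]
        rw [List.getElem?_cons_succ, List.getElem?_cons_succ]
    simp only [harg]
    rw [ih]
    simp [pvOdds]

lemma slice02 {α : Type} (xs : List α) :
    PySem.List.slice? xs (some 0) none 2 = some (pvEvens xs) := by
  simp only [PySem.List.slice?, PySem.List.sliceIndices]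
  norm_num
  rcases Nat.eq_zero_or_pos xs.length with h | h
  · match xs, h with
    | [], _ => simp [pvEvens]
  · rw [if_pos h]
    simpa using fm_even xs

lemma slice12 {α : Type} (xs : List α) :
    PySem.List.slice? xs (some 1) none 2 = some (pvOdds xs) := by
  simp only [PySem.List.slice?, PySem.List.sliceIndices]
  norm_num
  rcases Nat.lt_or_ge xs.length 2 with h | h
  · match xs, h with
    | [], _ => simp [pvOdds]
    | [a], _ => simp [pvOdds]
  · have hmin : min 1 ((xs.length : Int)) = 1 :=
      min_eq_left (by exact_mod_cast Nat.one_le_iff_ne_zero.mpr (by omega))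
    rw [if_pos (by omega : 1 < xs.length)]
    simpa [hmin] using fm_odd xs

lemma flatMap_gene_length (p : List Int) : (p.flatMap pvGene).length = 2 * p.length := by
  induction p with
  | nil => simp
  | cons c p ih =>
    have h2 : (pvGene c).length = 2 := by unfold pvGene; split <;> simp
    simp only [List.flatMap_cons, List.length_append, List.length_cons, h2, ih]
    omega

lemma chrom_step (p : List Int) (off : Int) (e : List (Int × Int × String)) :
    (((pvEvens ((p.flatMap pvGene).map (fun n => n + off))).zip
      (pvOdds ((p.flatMap pvGene).map (fun n => n + off)))).foldl
        (fun e xy => e ++ [(xy.1, xy.2, "BLACK")]) e)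
    = p.foldl (fun e v =>
        let i := |v|
        if v > 0 then e ++ [(2*i - 1 + off, 2*i + off, "BLACK")]
        else e ++ [(2*i + off, 2*i - 1 + off, "BLACK")]) e := by
  induction p generalizing e with
  | nil => simp [pvEvens, pvOdds]
  | cons c p ih =>
    simp only [List.flatMap_cons, List.foldl_cons]
    unfold pvGene
    by_cases hc : c > 0
    · simp only [if_pos hc, List.map_cons, List.cons_append, List.nil_append,
        pvEvens, pvOdds, List.zip_cons_cons, List.foldl_cons]
      exact ih _
    · simp only [if_neg hc, List.map_cons, List.cons_append, List.nil_append,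
        pvEvens, pvOdds, List.zip_cons_cons, List.foldl_cons]
      exact ih _

lemma step_eq :
    (fun (acc : List (Int × Int × String) × Int) (p : List Int) =>
      let nodes := chromosome_to_cycle p
      let nodes := nodes.map (fun n => n + acc.2)
      let offset := acc.2 + (nodes.length : Int)
      let pairs := ((PySem.List.slice? nodes (some 0) none 2).getD []).zip
                   ((PySem.List.slice? nodes (some 1) none 2).getD [])
      (pairs.foldl (fun e xy => e ++ [(xy.1, xy.2, "BLACK")]) acc.1, offset))
    = (fun (acc : List (Int × Int × String) × Int) (p : List Int) =>
      (p.foldl (fun e v =>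
          let i := |v|
          if v > 0 then e ++ [(2*i - 1 + acc.2, 2*i + acc.2, "BLACK")]
          else e ++ [(2*i + acc.2, 2*i - 1 + acc.2, "BLACK")]) acc.1,
       acc.2 + 2 * (p.length : Int))) := by
  funext acc p
  dsimp only
  simp only [cycle_eq, slice02, slice12, Option.getD_some]
  refine Prod.ext ?_ ?_
  · exact chrom_step p acc.2 acc.1
  · simp only [List.length_map, flatMap_gene_length]
    push_cast
    ring

-- ===== VERDICT (by name: the statement is the Claim_ definition above) =====
theorem black_edges_spec : Claim_equal_black_edges := by
  intro p_list _
  unfold Spec_black_edges black_edges black_edges_alt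
  rw [step_eq]
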